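-- pv_equiv track=rewrite | github.com/KRR-Oxford/GNNQ | utils.py | create_triples_with_ids
-- ===== SOURCE A (Python) =====
-- def create_triples_with_ids(triples, relation2id=None):
--     entity2id = {}
--
--     no_rel_ids = False
--     if relation2id is None:
--         relation2id = {}
--         no_rel_ids = True
--
--     ent = 0
--     rel = 0
--
--     id_triples = []
--     for triple in triples:
--         if triple[0] not in entity2id:
--             entity2id[triple[0]] = ent
--             ent += 1
--         if triple[2] not in entity2id:
--             entity2id[triple[2]] = ent
--             ent += 1
--         if no_rel_ids & (triple[1] not in relation2id):
--             relation2id[triple[1]] = rel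
--             rel += 1
--
--         # Save the triplets corresponding to only the known relations
--         if triple[1] in relation2id:
--             id_triples.append([entity2id[triple[0]], relation2id[triple[1]], entity2id[triple[2]]])
--
--     id2entity = {v: k for k, v in entity2id.items()}
--     id2relation = {v: k for k, v in relation2id.items()}
--
--     return id_triples, entity2id, relation2id, id2entity, id2relation
-- ===== SOURCE B (Python) =====
-- def create_triples_with_ids(triples, relation2id=None):
--     # Vocabulary-first decomposition: ordered-dedup the entity / relation streams,
--     # assign ids by enumerate, then encode all triples in one pass over the final tables.
--     entities = list(dict.fromkeys(x for t in triples for x in (t[0], t[2])))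
--     entity2id = {e: i for i, e in enumerate(entities)}
--     if relation2id is None:
--         relation2id = {r: i for i, r in enumerate(dict.fromkeys(t[1] for t in triples))}
--     id_triples = [[entity2id[t[0]], relation2id[t[1]], entity2id[t[2]]]
--                   for t in triples if t[1] in relation2id]
--     id2entity = {v: k for k, v in entity2id.items()}
--     id2relation = {v: k for k, v in relation2id.items()}
--     return id_triples, entity2id, relation2id, id2entity, id2relation
-- ===== Notes on version B (the rewrite author's own statement) =====
-- stated objective: alternative
-- what changed: A makes one interleaved pass with explicit ent/rel counters, membership-test-then-insert id assignment and inline appending; B instead extracts the entity and relation vocabularies as ordered dedups of flat streams (dict.fromkeys), assigns ids via enumerate comprehensions, and encodes all triples in a separate pass over the finished tables.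
import Mathlib
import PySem

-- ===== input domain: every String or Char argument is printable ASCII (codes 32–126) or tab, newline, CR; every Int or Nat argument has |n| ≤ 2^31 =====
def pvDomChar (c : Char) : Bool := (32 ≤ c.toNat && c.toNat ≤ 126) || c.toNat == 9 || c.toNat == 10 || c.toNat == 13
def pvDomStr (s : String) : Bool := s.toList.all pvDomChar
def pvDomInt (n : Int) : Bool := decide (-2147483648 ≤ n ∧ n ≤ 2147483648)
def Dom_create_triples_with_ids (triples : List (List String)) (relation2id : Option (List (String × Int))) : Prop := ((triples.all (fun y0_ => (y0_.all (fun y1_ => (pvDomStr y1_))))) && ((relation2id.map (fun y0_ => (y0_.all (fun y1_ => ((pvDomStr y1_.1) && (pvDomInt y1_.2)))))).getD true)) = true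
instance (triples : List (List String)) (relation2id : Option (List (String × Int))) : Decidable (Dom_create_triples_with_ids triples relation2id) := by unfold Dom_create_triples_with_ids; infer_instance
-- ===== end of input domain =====

-- B replaces A's single interleaved counter loop by a vocabulary-first decomposition (ordered
-- dedup of the entity/relation streams, ids by enumerate, then one encoding pass); equivalence
-- of the RETURN value is proved on Pre_ (every triple has ≥ 3 components; elsewhere A raises).

-- ===== PORT A =====
-- shared by both ports: triple[i] for i ∈ {0,1,2}; Pre_ guarantees the index is in range,
-- so the default "" of pyGetD is never the value Python would not compute
def pvItem (t : List String) (i : Int) : String := PySem.List.pyGetD t i ""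

-- {v: k for k, v in d.items()} (shared: the identical inversion line occurs in both Pythons)
def pvInvert (d : PySem.Dict String Int) : List (Int × String) :=
  (d.items.foldl (fun (acc : PySem.Dict Int String) kv => acc.insert kv.2 kv.1) PySem.Dict.empty).items

structure PvStA where
  e2i : PySem.Dict String Int
  r2i : PySem.Dict String Int
  ent : Int
  rel : Int
  out : List (List Int)

-- one iteration of A's loop body, in A's statement order
def pvStepA (noRel : Bool) (s : PvStA) (t : List String) : PvStA :=
  let p1 := if s.e2i.contains (pvItem t 0) then (s.e2i, s.ent)
            else (s.e2i.insert (pvItem t 0) s.ent, s.ent + 1)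
  let p2 := if p1.1.contains (pvItem t 2) then p1
            else (p1.1.insert (pvItem t 2) p1.2, p1.2 + 1)
  let q  := if noRel && !(s.r2i.contains (pvItem t 1)) then (s.r2i.insert (pvItem t 1) s.rel, s.rel + 1)
            else (s.r2i, s.rel)
  let out1 := if q.1.contains (pvItem t 1) then
                s.out ++ [[p2.1.getD (pvItem t 0) 0, q.1.getD (pvItem t 1) 0, p2.1.getD (pvItem t 2) 0]]
              else s.out
  ⟨p2.1, q.1, p2.2, q.2, out1⟩

def create_triples_with_ids (triples : List (List String)) (relation2id : Option (List (String × Int))) : List (List Int) × (List (String × Int)) × (List (String × Int)) × (List (Int × String)) × (List (Int × String)) :=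
  let noRel := relation2id.isNone
  let r0 : PySem.Dict String Int := PySem.Dict.ofList (relation2id.getD [])
  let s := triples.foldl (pvStepA noRel) ⟨PySem.Dict.empty, r0, 0, 0, []⟩
  (s.out, s.e2i.items, s.r2i.items, pvInvert s.e2i, pvInvert s.r2i)

-- ===== PORT B =====
-- list(dict.fromkeys(stream)): first occurrences in order = PySem.Set.ofList
def pvDedup (xs : List String) : List String := PySem.Set.ofList xs

-- {e: i for i, e in enumerate(l)}: a dict comprehension is a fold of inserts over enumerate
def pvEnumDict (l : List String) : PySem.Dict String Int :=
  (PySem.List.enumerate l 0).foldl (fun d p => d.insert p.2 p.1) PySem.Dict.empty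

-- B's encoding comprehension: every triple with a known relation, against the final tables
def pvEncode (ts : List (List String)) (E R : PySem.Dict String Int) : List (List Int) :=
  (ts.filter (fun t => R.contains (pvItem t 1))).map
    (fun t => [E.getD (pvItem t 0) 0, R.getD (pvItem t 1) 0, E.getD (pvItem t 2) 0])

def create_triples_with_ids_alt (triples : List (List String)) (relation2id : Option (List (String × Int))) : List (List Int) × (List (String × Int)) × (List (String × Int)) × (List (Int × String)) × (List (Int × String)) :=
  let entities := pvDedup (triples.flatMap (fun t => [pvItem t 0, pvItem t 2]))
  let entity2id := pvEnumDict entities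
  let r2i : PySem.Dict String Int :=
    match relation2id with
    | none => pvEnumDict (pvDedup (triples.map (fun t => pvItem t 1)))
    | some l => PySem.Dict.ofList l
  (pvEncode triples entity2id r2i, entity2id.items, r2i.items, pvInvert entity2id, pvInvert r2i)

-- ===== PRECONDITION & SPEC =====
-- Pre_ excludes exactly the inputs on which the Python A raises IndexError: a triple with
-- fewer than 3 components.
def Pre_create_triples_with_ids (triples : List (List String)) (relation2id : Option (List (String × Int))) : Prop :=
  ∀ t ∈ triples, 3 ≤ t.length
instance (triples : List (List String)) (relation2id : Option (List (String × Int))) : Decidable (Pre_create_triples_with_ids triples relation2id) := by unfold Pre_create_triples_with_ids; infer_instance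

def pvWitness_create_triples_with_ids : List (List String) × (Option (List (String × Int))) :=
  ([["a", "r", "b"], ["b", "s", "a"]], none)

def Spec_create_triples_with_ids (triples : List (List String)) (relation2id : Option (List (String × Int))) (out : List (List Int) × (List (String × Int)) × (List (String × Int)) × (List (Int × String)) × (List (Int × String))) : Prop := out = create_triples_with_ids_alt triples relation2id
instance (triples : List (List String)) (relation2id : Option (List (String × Int))) (out : List (List Int) × (List (String × Int)) × (List (String × Int)) × (List (Int × String)) × (List (Int × String))) : Decidable (Spec_create_triples_with_ids triples relation2id out) := by
  unfold Spec_create_triples_with_ids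
  letI d1 : DecidableEq (List (List Int)) := inferInstance
  letI d2 : DecidableEq (List (String × Int)) := inferInstance
  letI d3 : DecidableEq (List (Int × String)) := inferInstance
  infer_instance

-- ===== CLAIM (what is proved, stated in full; the proofs are below) =====
def Claim_equal_create_triples_with_ids : Prop := ∀ (triples : List (List String)) (relation2id : Option (List (String × Int))), Dom_create_triples_with_ids triples relation2id → Pre_create_triples_with_ids triples relation2id → Spec_create_triples_with_ids triples relation2id (create_triples_with_ids triples relation2id)

-- ===== LEMMAS AND PROOFS =====

-- proof-side intermediate form: A's loop split into its two table components and the row stream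
-- "if k not in d: d[k] = len(d)" written as one function
def pvEntIns (d : PySem.Dict String Int) (k : String) : PySem.Dict String Int :=
  if d.contains k then d else d.insert k (d.size : Int)

def pvEStep (d : PySem.Dict String Int) (t : List String) : PySem.Dict String Int :=
  pvEntIns (pvEntIns d (pvItem t 0)) (pvItem t 2)

def pvRStep (b : Bool) (d : PySem.Dict String Int) (t : List String) : PySem.Dict String Int :=
  if b && !(d.contains (pvItem t 1)) then d.insert (pvItem t 1) (d.size : Int) else d

def pvStepB (b : Bool) (p : PySem.Dict String Int × PySem.Dict String Int) (t : List String) :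
    PySem.Dict String Int × PySem.Dict String Int :=
  (pvEStep p.1 t, pvRStep b p.2 t)

-- a lookup that already succeeds survives an insert guarded by "key not present"
theorem pv_get?_insert_fresh (d : PySem.Dict String Int) (key : String) (w : Int) (k : String) (v : Int)
    (hc : d.contains key = false) (h : d.get? k = some v) : (d.insert key w).get? k = some v := by
  rw [PySem.Dict.get?_insert]
  split_ifs with hk
  · subst hk
    rw [PySem.Dict.contains_eq_isSome_get?, h] at hc
    simp at hc
  · exact h

theorem pv_get?_entIns (d : PySem.Dict String Int) (key k : String) (v : Int)
    (h : d.get? k = some v) : (pvEntIns d key).get? k = some v := by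
  unfold pvEntIns
  split_ifs with hc
  · exact h
  · exact pv_get?_insert_fresh d key _ k v (by simpa using hc) h

-- lookup stability of the first (entity) table through B's phase-1 fold
theorem pv_stab_e (b : Bool) (ts : List (List String)) :
    ∀ (p : PySem.Dict String Int × PySem.Dict String Int) (k : String) (v : Int),
      p.1.get? k = some v → (ts.foldl (pvStepB b) p).1.get? k = some v := by
  induction ts with
  | nil => intro p k v h; exact h
  | cons t ts ih =>
      intro p k v h
      simp only [List.foldl_cons]
      exact ih _ k v (pv_get?_entIns _ _ _ _ (pv_get?_entIns _ _ _ _ h))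

-- lookup stability of the second (relation) table through B's phase-1 fold
theorem pv_stab_r (b : Bool) (ts : List (List String)) :
    ∀ (p : PySem.Dict String Int × PySem.Dict String Int) (k : String) (v : Int),
      p.2.get? k = some v → (ts.foldl (pvStepB b) p).2.get? k = some v := by
  induction ts with
  | nil => intro p k v h; exact h
  | cons t ts ih =>
      intro p k v h
      simp only [List.foldl_cons]
      apply ih
      show (pvStepB b p t).2.get? k = some v
      simp only [pvStepB, pvRStep]
      split_ifs with hc
      · simp only [Bool.and_eq_true, Bool.not_eq_true'] at hc
        exact pv_get?_insert_fresh _ _ _ _ _ hc.2 h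
      · exact h

theorem pv_contains_stab_r (b : Bool) (ts : List (List String))
    (p : PySem.Dict String Int × PySem.Dict String Int) (k : String)
    (h : p.2.contains k = true) : (ts.foldl (pvStepB b) p).2.contains k = true := by
  rw [PySem.Dict.contains_eq_isSome_get?] at h
  obtain ⟨v, hv⟩ := Option.isSome_iff_exists.mp h
  rw [PySem.Dict.contains_eq_isSome_get?, pv_stab_r b ts p k v hv]; rfl

-- with given relation ids (b = false) the relation table never changes
theorem pv_const_r (ts : List (List String)) :
    ∀ (p : PySem.Dict String Int × PySem.Dict String Int),
      (ts.foldl (pvStepB false) p).2 = p.2 := by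
  induction ts with
  | nil => intro p; rfl
  | cons t ts ih => intro p; simp only [List.foldl_cons]; rw [ih]; simp [pvStepB, pvRStep]

theorem pv_entIns_contains_self (d : PySem.Dict String Int) (k : String) :
    (pvEntIns d k).contains k = true := by
  unfold pvEntIns
  split_ifs with hc
  · exact hc
  · exact PySem.Dict.contains_insert_self d k _

theorem pv_entIns_contains_mono (d : PySem.Dict String Int) (key k : String)
    (h : d.contains k = true) : (pvEntIns d key).contains k = true := by
  unfold pvEntIns
  split_ifs with hc
  · exact h
  · rw [PySem.Dict.contains_insert]; simp [h]

-- getD agreement between the step-time tables and the final tables, for keys present at step time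
theorem pv_getD_stab_e (b : Bool) (ts : List (List String))
    (p : PySem.Dict String Int × PySem.Dict String Int) (k : String)
    (h : p.1.contains k = true) :
    (ts.foldl (pvStepB b) p).1.getD k 0 = p.1.getD k 0 := by
  rw [PySem.Dict.contains_eq_isSome_get?] at h
  obtain ⟨v, hv⟩ := Option.isSome_iff_exists.mp h
  rw [PySem.Dict.getD_eq_get?_getD, PySem.Dict.getD_eq_get?_getD, hv, pv_stab_e b ts p k v hv]

theorem pv_getD_stab_r (b : Bool) (ts : List (List String))
    (p : PySem.Dict String Int × PySem.Dict String Int) (k : String)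
    (h : p.2.contains k = true) :
    (ts.foldl (pvStepB b) p).2.getD k 0 = p.2.getD k 0 := by
  rw [PySem.Dict.contains_eq_isSome_get?] at h
  obtain ⟨v, hv⟩ := Option.isSome_iff_exists.mp h
  rw [PySem.Dict.getD_eq_get?_getD, PySem.Dict.getD_eq_get?_getD, hv, pv_stab_r b ts p k v hv]

-- step-time presence of the three keys in the step result
theorem pv_stepB_contains_e0 (b : Bool) (p : PySem.Dict String Int × PySem.Dict String Int) (t : List String) :
    (pvStepB b p t).1.contains (pvItem t 0) = true := by
  simp only [pvStepB, pvEStep]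
  exact pv_entIns_contains_mono _ _ _ (pv_entIns_contains_self _ _)

theorem pv_stepB_contains_e2 (b : Bool) (p : PySem.Dict String Int × PySem.Dict String Int) (t : List String) :
    (pvStepB b p t).1.contains (pvItem t 2) = true := by
  simp only [pvStepB, pvEStep]
  exact pv_entIns_contains_self _ _

theorem pv_stepB_contains_r (p : PySem.Dict String Int × PySem.Dict String Int) (t : List String) :
    (pvStepB true p t).2.contains (pvItem t 1) = true := by
  simp only [pvStepB, pvRStep, Bool.true_and]
  split_ifs with hc
  · exact PySem.Dict.contains_insert_self _ _ _
  · simp at hc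
    exact hc

-- one step of A, under the counter/size synchronisation, is one step of the table pair plus the appended row
theorem pv_step_sync (noRel : Bool) (e2i r2i : PySem.Dict String Int) (ent rel : Int)
    (out : List (List Int)) (t : List String)
    (he : ent = (e2i.size : Int)) (hr : noRel = true → rel = (r2i.size : Int)) :
    pvStepA noRel ⟨e2i, r2i, ent, rel, out⟩ t =
      ⟨(pvStepB noRel (e2i, r2i) t).1, (pvStepB noRel (e2i, r2i) t).2,
       ((pvStepB noRel (e2i, r2i) t).1.size : Int),
       (if noRel then ((pvStepB noRel (e2i, r2i) t).2.size : Int) else rel),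
       out ++ (if (pvStepB noRel (e2i, r2i) t).2.contains (pvItem t 1) then
           [[(pvStepB noRel (e2i, r2i) t).1.getD (pvItem t 0) 0,
             (pvStepB noRel (e2i, r2i) t).2.getD (pvItem t 1) 0,
             (pvStepB noRel (e2i, r2i) t).1.getD (pvItem t 2) 0]] else [])⟩ := by
  cases hn : noRel with
  | false =>
      simp only [pvStepA, pvStepB, pvEStep, pvRStep, pvEntIns, Bool.false_and]
      split_ifs <;> simp_all [PySem.Dict.size_insert, Nat.cast_add, Nat.cast_one]
  | true =>
      have hrel := hr hn
      simp only [pvStepA, pvStepB, pvEStep, pvRStep, pvEntIns, Bool.true_and]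
      split_ifs <;> simp_all [PySem.Dict.size_insert, Nat.cast_add, Nat.cast_one]

-- the whole of A's fold equals the table-pair fold plus the encoding of the suffix
theorem pv_fold_sync (noRel : Bool) (ts : List (List String)) :
    ∀ (e2i r2i : PySem.Dict String Int) (ent rel : Int) (out : List (List Int)),
      ent = (e2i.size : Int) → (noRel = true → rel = (r2i.size : Int)) →
      ts.foldl (pvStepA noRel) ⟨e2i, r2i, ent, rel, out⟩ =
        ⟨(ts.foldl (pvStepB noRel) (e2i, r2i)).1, (ts.foldl (pvStepB noRel) (e2i, r2i)).2,
         ((ts.foldl (pvStepB noRel) (e2i, r2i)).1.size : Int),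
         (if noRel then ((ts.foldl (pvStepB noRel) (e2i, r2i)).2.size : Int) else rel),
         out ++ pvEncode ts (ts.foldl (pvStepB noRel) (e2i, r2i)).1 (ts.foldl (pvStepB noRel) (e2i, r2i)).2⟩ := by
  induction ts with
  | nil =>
      intro e2i r2i ent rel out he hr
      cases hn : noRel with
      | false => simp [pvEncode, he]
      | true => simp [pvEncode, he, hr hn]
  | cons t ts ih =>
      intro e2i r2i ent rel out he hr
      simp only [List.foldl_cons]
      rw [pv_step_sync noRel e2i r2i ent rel out t he hr]
      rw [ih (pvStepB noRel (e2i, r2i) t).1 (pvStepB noRel (e2i, r2i) t).2 _ _ _ rfl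
            (by intro h; simp [h])]
      set p := pvStepB noRel (e2i, r2i) t with hp
      set q := ts.foldl (pvStepB noRel) p with hq
      have hcont : q.2.contains (pvItem t 1) = p.2.contains (pvItem t 1) := by
        cases hn : noRel with
        | false =>
            rw [hq, hn, pv_const_r ts p]
        | true =>
            rw [hn] at hp
            have h1 : p.2.contains (pvItem t 1) = true := by rw [hp]; exact pv_stepB_contains_r _ t
            rw [h1, hq, hn]
            exact pv_contains_stab_r true ts p _ h1
      have hE0 : q.1.getD (pvItem t 0) 0 = p.1.getD (pvItem t 0) 0 := by
        rw [hq]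
        exact pv_getD_stab_e noRel ts p _ (by rw [hp]; exact pv_stepB_contains_e0 _ _ t)
      have hE2 : q.1.getD (pvItem t 2) 0 = p.1.getD (pvItem t 2) 0 := by
        rw [hq]
        exact pv_getD_stab_e noRel ts p _ (by rw [hp]; exact pv_stepB_contains_e2 _ _ t)
      have hR1 : p.2.contains (pvItem t 1) = true → q.2.getD (pvItem t 1) 0 = p.2.getD (pvItem t 1) 0 := by
        intro h1
        rw [hq]
        exact pv_getD_stab_r noRel ts p _ h1
      have hhead : pvEncode (t :: ts) q.1 q.2 =
          (if p.2.contains (pvItem t 1) then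
            [[p.1.getD (pvItem t 0) 0, p.2.getD (pvItem t 1) 0, p.1.getD (pvItem t 2) 0]] else [])
          ++ pvEncode ts q.1 q.2 := by
        simp only [pvEncode, List.filter_cons]
        rw [hcont]
        by_cases h1 : p.2.contains (pvItem t 1) = true
        · simp [h1, hE0, hE2, hR1 h1]
        · simp only [Bool.not_eq_true] at h1
          simp [h1]
      rw [hhead]
      cases noRel <;> simp [List.append_assoc]

-- ===== the table-pair fold computes B's enumerate dictionaries =====

theorem pv_keys_enumDict (l : List String) : (pvEnumDict l).keys = PySem.Set.ofList l := by
  unfold pvEnumDict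
  rw [PySem.Dict.keys_foldl_insert_key (key := fun p : Int × String => p.2)
       (f := fun _ p => p.1)]
  simp only [PySem.List.map_snd_enumerate, PySem.Dict.keys_empty]
  exact PySem.Set.update_empty l

theorem pv_contains_enumDict (l : List String) (k : String) :
    (pvEnumDict l).contains k = true ↔ k ∈ l := by
  rw [PySem.Dict.contains_iff_mem_keys, pv_keys_enumDict]
  exact PySem.Set.mem_ofList l k

theorem pv_size_enumDict (l : List String) (h : l.Nodup) : (pvEnumDict l).size = l.length := by
  have hk : (pvEnumDict l).keys.length = (pvEnumDict l).size := by
    simp [PySem.Dict.keys, PySem.Dict.size]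
  rw [← hk, pv_keys_enumDict, PySem.Set.ofList_eq_self_of_nodup l h]

theorem pv_enumDict_append (l : List String) (k : String) (_hk : k ∉ l) :
    pvEnumDict (l ++ [k]) = (pvEnumDict l).insert k (l.length : Int) := by
  unfold pvEnumDict
  rw [PySem.List.enumerate_append, List.foldl_append]
  simp [PySem.List.enumerate_cons]

-- "if k not in d: d[k] = len(d)" on an enumerate table is exactly ordered-set insertion
theorem pv_entIns_enumDict (l : List String) (h : l.Nodup) (k : String) :
    pvEntIns (pvEnumDict l) k = pvEnumDict (PySem.Set.add l k) := by
  unfold pvEntIns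
  by_cases hm : k ∈ l
  · rw [if_pos ((pv_contains_enumDict l k).mpr hm), PySem.Set.add_of_mem hm]
  · rw [if_neg (by simp [(pv_contains_enumDict l k).not] at *; exact hm),
        PySem.Set.add_of_not_mem hm, pv_enumDict_append l k hm, pv_size_enumDict l h]

theorem pv_entFold_enumDict (xs : List String) :
    ∀ (l : List String), l.Nodup →
      xs.foldl pvEntIns (pvEnumDict l) = pvEnumDict (PySem.Set.update l xs) := by
  induction xs with
  | nil => intro l _; simp [PySem.Set.update_nil]
  | cons x xs ih =>
      intro l h
      rw [List.foldl_cons, pv_entIns_enumDict l h x, PySem.Set.update_cons]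
      exact ih (PySem.Set.add l x) (PySem.Set.nodup_add l x h)

theorem pv_entFold_ofList (xs : List String) :
    xs.foldl pvEntIns PySem.Dict.empty = pvEnumDict (PySem.Set.ofList xs) := by
  have h0 : (PySem.Dict.empty : PySem.Dict String Int) = pvEnumDict [] := rfl
  rw [h0, pv_entFold_enumDict xs [] List.nodup_nil]
  rw [show PySem.Set.update ([] : List String) xs = PySem.Set.ofList xs from PySem.Set.update_empty xs]

-- the pair fold splits into the two independent table folds
theorem pv_pair_split (b : Bool) (ts : List (List String)) (E R : PySem.Dict String Int) :
    ts.foldl (pvStepB b) (E, R) = (ts.foldl pvEStep E, ts.foldl (pvRStep b) R) := by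
  induction ts generalizing E R with
  | nil => rfl
  | cons t ts ih => simp only [List.foldl_cons]; exact ih _ _

-- the entity fold over triples is the plain fold over the flattened entity stream
theorem pv_eFold_flat (ts : List (List String)) :
    ∀ (d : PySem.Dict String Int),
      ts.foldl pvEStep d = (ts.flatMap (fun t => [pvItem t 0, pvItem t 2])).foldl pvEntIns d := by
  induction ts with
  | nil => intro d; rfl
  | cons t ts ih => intro d; simp only [List.foldl_cons, List.flatMap_cons, List.foldl_append]; exact ih _

-- when relation ids are being built, the relation step is the same set insertion on triple[1]
theorem pv_rStep_true (d : PySem.Dict String Int) (t : List String) :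
    pvRStep true d t = pvEntIns d (pvItem t 1) := by
  simp only [pvRStep, pvEntIns, Bool.true_and]
  by_cases hc : d.contains (pvItem t 1) = true <;> simp [hc]

theorem pv_rFold_map (ts : List (List String)) (d : PySem.Dict String Int) :
    ts.foldl (pvRStep true) d = (ts.map (fun t => pvItem t 1)).foldl pvEntIns d := by
  induction ts generalizing d with
  | nil => rfl
  | cons t ts ih => simp only [List.foldl_cons, List.map_cons, pv_rStep_true]; exact ih _

-- with given relation ids the relation-table fold is the identity
theorem pv_rFold_false (ts : List (List String)) :
    ∀ (d : PySem.Dict String Int), ts.foldl (pvRStep false) d = d := by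
  induction ts with
  | nil => intro d; rfl
  | cons t ts ih => intro d; simp only [List.foldl_cons, pvRStep, Bool.false_and]; exact ih _

-- ===== VERDICT (by name: the statement is the Claim_ definition above) =====
theorem create_triples_with_ids_spec : Claim_equal_create_triples_with_ids := by
  intro triples relation2id _ _
  unfold Spec_create_triples_with_ids
  simp only [create_triples_with_ids, create_triples_with_ids_alt]
  rw [pv_fold_sync (relation2id.isNone) triples PySem.Dict.empty
        (PySem.Dict.ofList (relation2id.getD [])) 0 0 [] (by simp)
        (by cases relation2id with
            | none => intro _; simp [PySem.Dict.ofList]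
            | some l => intro h; simp at h)]
  cases relation2id with
  | none =>
      simp only [Option.isNone_none, Option.getD_none]
      rw [pv_pair_split, pv_eFold_flat, pv_rFold_map, pv_entFold_ofList,
          show (PySem.Dict.ofList ([] : List (String × Int))) = PySem.Dict.empty from rfl,
          pv_entFold_ofList]
      simp [pvDedup]
  | some l =>
      simp only [Option.isNone_some, Option.getD_some]
      rw [pv_pair_split, pv_eFold_flat, pv_entFold_ofList, pv_rFold_false]
      simp [pvDedup]
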